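-- pv_equiv track=rewrite | github.com/MrBrantCode/unitest_baseline | mut_generate/mist_train_cf/cf_86453/solution.py | remove_longest_word
-- ===== SOURCE A (Python) =====
-- def remove_longest_word(sentence):
--     words = sentence.split(" ")
--
--     # Find the length of the longest word
--     max_length = 0
--     for word in words:
--         length = 0
--         for char in word:
--             if char.isalpha():
--                 length += 1
--         if length > max_length:
--             max_length = length
--
--     # Remove all words with the longest length
--     result = ""
--     for word in words:
--         length = 0
--         for char in word:
--             if char.isalpha():
--                 length += 1
--         if length != max_length:
--             result += word + " "
--
--     return result.strip()
-- ===== SOURCE B (Python) =====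
-- def remove_longest_word(sentence):
--     words = sentence.split(" ")
--     # inverted index: alpha-count -> list of word positions, built in one pass
--     groups = {}
--     for i, w in enumerate(words):
--         c = sum(1 for ch in w if ch.isalpha())
--         groups[c] = groups.get(c, []) + [i]
--     m = max(groups)
--     keep = sorted(i for c in groups if c != m for i in groups[c])
--     return " ".join(words[i] for i in keep).strip()
-- ===== Notes on version B (the rewrite author's own statement) =====
-- stated objective: alternative
-- what changed: Replaces A's two duplicated scan-and-compare passes (running max, then re-count-and-filter) by a single grouping pass building an inverted index from alpha-count to word positions; the max is taken over the distinct counts (dict keys) and the answer is the join of the words at the sorted positions of all non-max buckets.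
import Mathlib
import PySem

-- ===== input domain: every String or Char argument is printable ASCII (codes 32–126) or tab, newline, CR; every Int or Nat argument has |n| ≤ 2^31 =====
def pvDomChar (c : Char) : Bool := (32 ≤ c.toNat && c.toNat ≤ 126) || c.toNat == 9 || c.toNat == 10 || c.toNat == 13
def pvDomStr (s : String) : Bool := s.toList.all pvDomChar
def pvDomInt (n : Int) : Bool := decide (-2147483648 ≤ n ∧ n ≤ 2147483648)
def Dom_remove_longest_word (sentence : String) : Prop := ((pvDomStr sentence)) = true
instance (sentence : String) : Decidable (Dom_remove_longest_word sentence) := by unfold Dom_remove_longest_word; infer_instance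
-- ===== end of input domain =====

-- B replaces A's two duplicated scan-and-compare passes by one grouping pass into a count->positions index, a max over the distinct counts, and a join over the sorted non-max positions (objective: alternative).


-- ===== PORT A =====
def remove_longest_word (sentence : String) : String :=
  let words := PySem.Chars.splitOn sentence.toList [' ']
  let max_length := words.foldl (fun max_length word =>
      let length := word.foldl (fun length char =>
          if PySem.Chars.isalpha char then length + 1 else length) (0 : Nat)
      if length > max_length then length else max_length) (0 : Nat)
  let result := words.foldl (fun (result : List Char) word =>
      let length := word.foldl (fun length char =>
          if PySem.Chars.isalpha char then length + 1 else length) (0 : Nat)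
      if length ≠ max_length then result ++ word ++ [' '] else result) []
  String.ofList (PySem.Chars.strip result)

-- ===== PORT B =====
def remove_longest_word_alt (sentence : String) : String :=
  let words := PySem.Chars.splitOn sentence.toList [' ']
  -- one grouping pass: alpha-count -> positions (groups[c] = groups.get(c, []) + [i])
  let groups : PySem.Dict Nat (List Int) :=
    (PySem.List.enumerate words).foldl
      (fun d p =>
        let c := p.2.countP PySem.Chars.isalpha
        d.modify c [] (· ++ [p.1])) PySem.Dict.empty
  let m := (PySem.List.max? groups.keys (fun y => y)).getD 0   -- max(groups): max over keys
  let keep := PySem.List.sorted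
      ((groups.keys.filter (fun c => c ≠ m)).flatMap (fun c => groups.getD c []))
      (fun y => y) false
  let kept := keep.map (fun i => PySem.List.pyGetD words i [])
  String.ofList (PySem.Chars.strip (PySem.Chars.join [' '] kept))

-- ===== PRECONDITION & SPEC =====
def Spec_remove_longest_word (sentence : String) (out : String) : Prop := out = remove_longest_word_alt sentence
instance (sentence : String) (out : String) : Decidable (Spec_remove_longest_word sentence out) := by unfold Spec_remove_longest_word; infer_instance

-- ===== CLAIM (what is proved, stated in full; the proofs are below) =====
def Claim_equal_remove_longest_word : Prop := ∀ (sentence : String), Dom_remove_longest_word sentence → Spec_remove_longest_word sentence (remove_longest_word sentence)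

-- ===== LEMMAS AND PROOFS =====

-- A's inner counting loop is countP
theorem pv_count_loop (w : List Char) (n : Nat) :
    w.foldl (fun length char => if PySem.Chars.isalpha char then length + 1 else length) n
      = n + w.countP PySem.Chars.isalpha := by
  induction w generalizing n with
  | nil => simp
  | cons c t ih =>
      by_cases h : PySem.Chars.isalpha c
      · simp [h, ih]; omega
      · simp [h, ih]

-- A's running-max loop is foldl max
theorem pv_max_loop (ls : List Nat) (a : Nat) :
    ls.foldl (fun m l => if l > m then l else m) a = ls.foldl max a := by
  induction ls generalizing a with
  | nil => rfl
  | cons x t ih =>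
      simp only [List.foldl_cons]
      rw [show (if x > a then x else a) = max a x from by
        by_cases h : x > a <;> simp [h] <;> omega]
      exact ih _

-- A's collecting loop appends word++" " for each kept word
theorem pv_collect_loop (f : List Char → Nat) (m : Nat) (ws : List (List Char)) (acc : List Char) :
    ws.foldl (fun (result : List Char) word => if f word ≠ m then result ++ word ++ [' '] else result) acc
      = acc ++ (ws.filter (fun w => f w ≠ m)).flatMap (· ++ [' ']) := by
  induction ws generalizing acc with
  | nil => simp
  | cons w t ih =>
      rw [List.foldl_cons]
      by_cases h : f w = m
      · rw [if_neg (by simp [h]), ih]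
        simp [h]
      · rw [if_pos (by simp [h]), ih]
        simp [h]

theorem pv_rstrip_space (x : List Char) :
    PySem.Chars.rstrip (x ++ [' ']) = PySem.Chars.rstrip x := by
  simp [PySem.Chars.rstrip, show PySem.Chars.isspace ' ' = true from rfl]

theorem pv_strip_space (x : List Char) :
    PySem.Chars.strip (x ++ [' ']) = PySem.Chars.strip x := by
  simp only [PySem.Chars.strip, PySem.Chars.lstrip, List.dropWhile_append]
  by_cases h : (List.dropWhile PySem.Chars.isspace x).isEmpty
  · simp [show List.dropWhile PySem.Chars.isspace [' '] = [] from rfl, List.isEmpty_iff.mp h]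
  · simp [h, pv_rstrip_space]

theorem pv_flatMap_join (ks : List (List Char)) (h : ks ≠ []) :
    ks.flatMap (· ++ [' ']) = PySem.Chars.join [' '] ks ++ [' '] := by
  induction ks with
  | nil => exact absurd rfl h
  | cons k t ih =>
      cases t with
      | nil => simp [PySem.Chars.join_singleton]
      | cons k2 t2 =>
          rw [List.flatMap_cons, ih (by simp), PySem.Chars.join_cons_cons]
          simp

theorem pv_strip_flatMap (ks : List (List Char)) :
    PySem.Chars.strip (ks.flatMap (· ++ [' '])) = PySem.Chars.strip (PySem.Chars.join [' '] ks) := by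
  cases hk : ks with
  | nil => rfl
  | cons k t => rw [← hk, pv_flatMap_join ks (by simp [hk]), pv_strip_space]

-- max over the distinct values equals the running max from 0 (for a nonempty Nat list)
theorem pv_foldl_max_ub (t : List Nat) (x : Nat) :
    ∀ z ∈ x :: t, z ≤ t.foldl max x := by
  intro z hz
  rcases List.mem_cons.mp hz with rfl | hz'
  · exact (PySem.List.le_foldl_max t z).1
  · exact (PySem.List.le_foldl_max t x).2 z hz'

theorem pv_foldl_max_mem' (t : List Nat) (x : Nat) : t.foldl max x ∈ x :: t := by
  rcases PySem.List.foldl_max_mem t x with h | h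
  · simp [h]
  · simp [h]

theorem pv_max_set (xs : List Nat) (h : xs ≠ []) :
    (PySem.List.max? (PySem.Set.ofList xs) (fun y => y)).getD 0 = xs.foldl max 0 := by
  obtain ⟨x, t, rfl⟩ := List.exists_cons_of_ne_nil h
  have hfold : (x :: t).foldl max 0 = t.foldl max x := by
    simp
  have hx : x ∈ PySem.Set.ofList (x :: t) := (PySem.Set.mem_ofList _ _).mpr (by simp)
  obtain ⟨y, s, hs⟩ := List.exists_cons_of_ne_nil (List.ne_nil_of_mem hx)
  rw [hs, PySem.List.max?_id_cons, Option.getD_some, hfold]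
  have hmemB : s.foldl max y ∈ x :: t := by
    apply (PySem.Set.mem_ofList _ _).mp
    rw [hs]
    exact pv_foldl_max_mem' s y
  have hmemA : t.foldl max x ∈ y :: s := by
    rw [← hs]
    exact (PySem.Set.mem_ofList _ _).mpr (pv_foldl_max_mem' t x)
  exact Nat.le_antisymm (pv_foldl_max_ub t x _ hmemB) (pv_foldl_max_ub s y _ hmemA)

-- partition: flatMap of per-key filters over a covering nodup key list is a permutation
theorem pv_flatMap_filter_perm {β : Type} (ks : List Nat) (l : List (Nat × β))
    (hnd : ks.Nodup) (hc : ∀ p ∈ l, p.1 ∈ ks) :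
    (ks.flatMap (fun c => l.filter (fun q => q.1 == c))).Perm l := by
  induction ks generalizing l with
  | nil =>
      cases l with
      | nil => simp
      | cons p t => exact absurd (hc p (by simp)) (by simp)
  | cons c t ih =>
      rw [List.flatMap_cons]
      have hrw : t.flatMap (fun c' => l.filter (fun q => q.1 == c'))
          = t.flatMap (fun c' => (l.filter (fun q => !(q.1 == c))).filter (fun q => q.1 == c')) := by
        apply List.flatMap_congr
        intro c' hc' 
        rw [List.filter_filter]
        apply List.filter_congr
        intro q _
        cases hq : (q.1 == c') with
        | false => simp
        | true =>
            have : q.1 = c' := by simpa using hq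
            have hne : c' ≠ c := fun h => (List.nodup_cons.mp hnd).1 (h ▸ hc')
            simp [this, hne]
      rw [hrw]
      have hperm := ih (l.filter (fun q => !(q.1 == c))) (List.nodup_cons.mp hnd).2
        (by
          intro p hp
          rw [List.mem_filter] at hp
          have := hc p hp.1
          rcases List.mem_cons.mp this with h' | h'
          · exact absurd hp.2 (by simp [h'])
          · exact h')
      exact List.Perm.trans (List.Perm.append_left _ hperm) (List.filter_append_perm _ l)

-- filtering enumerate on a property of the value, then taking the values
theorem pv_filter_enumerate_snd {α : Type} (q : α → Bool) (ws : List α) (s : Int) :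
    ((PySem.List.enumerate ws s).filter (fun p => q p.2)).map (·.2) = ws.filter q := by
  induction ws generalizing s with
  | nil => rfl
  | cons w t ih =>
      rw [PySem.List.enumerate_cons, List.filter_cons]
      cases hq : q w with
      | false => simpa [hq] using ih (s + 1)
      | true => simpa [hq] using ih (s + 1)

-- B-side key lemmas specialized to the programs

-- the grouping fold over enumerate equals the pair-form fold
theorem pv_groups_eq (ws : List (List Char)) :
    (PySem.List.enumerate ws).foldl
      (fun (d : PySem.Dict Nat (List Int)) p =>
        let c := p.2.countP PySem.Chars.isalpha
        d.modify c [] (· ++ [p.1])) PySem.Dict.empty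
    = ((PySem.List.enumerate ws).map (fun p => (p.2.countP PySem.Chars.isalpha, p.1))).foldl
        (fun (d : PySem.Dict Nat (List Int)) q => d.modify q.1 [] (· ++ [q.2])) PySem.Dict.empty := by
  rw [List.foldl_map]

-- ===== VERDICT (by name: the statement is the Claim_ definition above) =====
theorem remove_longest_word_spec : Claim_equal_remove_longest_word := by
  intro sentence _
  unfold Spec_remove_longest_word remove_longest_word remove_longest_word_alt
  set ws := PySem.Chars.splitOn sentence.toList [' '] with hws
  set cnt := fun (w : List Char) => w.countP PySem.Chars.isalpha with hcnt
  -- A's inner counting loops are countP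
  have hf : (fun (w : List Char) =>
      w.foldl (fun length char => if PySem.Chars.isalpha char then length + 1 else length) 0)
        = cnt := by
    funext w; rw [pv_count_loop]; simp [hcnt]
  simp only [hf]
  -- A's max loop over words is the running max over the counts
  have hMA : List.foldl (fun max_length word => if cnt word > max_length then cnt word else max_length) 0 ws
      = (ws.map cnt).foldl max 0 := by
    rw [← pv_max_loop, List.foldl_map]
  rw [hMA, pv_collect_loop cnt ((ws.map cnt).foldl max 0) ws [], List.nil_append, pv_strip_flatMap]
  -- the grouping fold in pair form
  rw [pv_groups_eq ws]
  set pairs := (PySem.List.enumerate ws).map (fun p => (cnt p.2, p.1)) with hpairs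
  set groups := pairs.foldl
      (fun (d : PySem.Dict Nat (List Int)) q => d.modify q.1 [] (· ++ [q.2])) PySem.Dict.empty with hgroups
  by_cases hnil : ws = []
  · rw [hnil] at hpairs ⊢
    rw [hgroups, hpairs]
    rfl
  -- keys are the distinct counts
  have hmapfst : pairs.map Prod.fst = ws.map cnt := by
    rw [hpairs, List.map_map]
    have : (Prod.fst ∘ fun p : Int × List Char => (cnt p.2, p.1)) = (fun p : Int × List Char => cnt p.2) := rfl
    rw [this, show (fun p : Int × List Char => cnt p.2) = cnt ∘ Prod.snd from rfl, ← List.map_map,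
      PySem.List.map_snd_enumerate]
  have hkeys : groups.keys = PySem.Set.ofList (ws.map cnt) := by
    rw [hgroups, PySem.Dict.keys_foldl_modify_key, PySem.Dict.keys_empty, hmapfst]
    rw [PySem.Set.ofList_eq_foldl]
    rfl
  have hnodup : groups.keys.Nodup := by
    rw [hkeys]
    exact PySem.Set.nodup_ofList _
  have hget : ∀ c, groups.getD c [] = (pairs.filter (fun q => q.1 == c)).map (·.2) := by
    intro c
    rw [hgroups]
    simpa using PySem.Dict.getD_foldl_modify_append pairs PySem.Dict.empty c
  -- the two maxima agree
  have hm : (PySem.List.max? groups.keys (fun y => y)).getD 0 = (ws.map cnt).foldl max 0 := by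
    rw [hkeys, pv_max_set _ (by simpa using hnil)]
  rw [hm]
  set M := (ws.map cnt).foldl max 0 with hM
  set l' := pairs.filter (fun q => decide (q.1 ≠ M)) with hl'
  -- push the .map (·.2) outside the flatMap and restrict each bucket to l'
  have hflat : (groups.keys.filter (fun c => decide (c ≠ M))).flatMap (fun c => groups.getD c [])
      = ((groups.keys.filter (fun c => decide (c ≠ M))).flatMap
          (fun c => l'.filter (fun q => q.1 == c))).map (·.2) := by
    simp only [hget]
    rw [List.map_flatMap]
    apply List.flatMap_congr
    intro c hc
    have hcM : c ≠ M := by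
      have := (List.mem_filter.mp hc).2
      simpa using this
    congr 1
    rw [hl', List.filter_filter]
    apply List.filter_congr
    intro q _
    cases hq : (q.1 == c) with
    | false => simp
    | true =>
        have : q.1 = c := by simpa using hq
        simp [this, hcM]
  -- bucket concatenation is a permutation of l'
  have hperm : ((groups.keys.filter (fun c => decide (c ≠ M))).flatMap
      (fun c => l'.filter (fun q => q.1 == c))).Perm l' := by
    apply pv_flatMap_filter_perm
    · exact hnodup.filter _
    · intro p hp
      rw [hl', List.mem_filter] at hp
      rw [List.mem_filter]
      constructor
      · rw [hkeys]
        apply (PySem.Set.mem_ofList _ _).mpr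
        rw [← hmapfst]
        exact List.mem_map_of_mem hp.1
      · exact hp.2
  -- l' keeps strictly increasing positions
  have hpair2 : pairs.Pairwise (fun a b => a.2 < b.2) := by
    rw [hpairs]
    exact List.pairwise_map.mpr (PySem.List.pairwise_lt_enumerate ws 0)
  have hpw : (l'.map (·.2)).Pairwise (fun a b => a < b) := by
    apply List.pairwise_map.mpr
    rw [hl']
    exact hpair2.sublist List.filter_sublist
  have hsorted : PySem.List.sorted
      ((groups.keys.filter (fun c => decide (c ≠ M))).flatMap (fun c => groups.getD c []))
      (fun y => y) false = l'.map (·.2) := by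
    rw [hflat]
    apply PySem.List.sorted_eq_of_perm_of_pairwise_lt
    · exact (hperm.map _).symm
    · exact hpw
  rw [hsorted]
  -- positions back to words
  have hl'form : l' = ((PySem.List.enumerate ws).filter
      (fun p => decide (cnt p.2 ≠ M))).map (fun p => (cnt p.2, p.1)) := by
    rw [hl', hpairs, List.filter_map]
    rfl
  have hwords : (l'.map (·.2)).map (fun i => PySem.List.pyGetD ws i [])
      = ws.filter (fun w => decide (cnt w ≠ M)) := by
    rw [hl'form, List.map_map, List.map_map,
      ← pv_filter_enumerate_snd (fun w => decide (cnt w ≠ M)) ws 0]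
    apply List.map_congr_left
    intro p hp
    have hpe := List.mem_filter.mp hp |>.1
    obtain ⟨k, hk, rfl⟩ := (PySem.List.mem_enumerate_iff _ _ _).mp hpe
    show PySem.List.pyGetD ws ((0 : Int) + k) [] = ws[k]
    rw [zero_add, PySem.List.pyGetD_natCast, List.getD_eq_getElem _ _ hk]
  rw [hwords]
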